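-- pv_equiv track=rewrite | github.com/Anotheroption4726/Learning | Python/Practice/CodeWars/Amidakuji.py | amidakuji
-- ===== SOURCE A (Python) =====
-- def amidakuji(inputLadder):
--     startList = createInitialList(inputLadder[0])
--     endList = startList
--     i = 0
--     while i < len(startList):
--         currentIndex = i
--         j = 0
--         while j < len(inputLadder):
--             if currentIndex < len(startList) - 1 and inputLadder[j][currentIndex] == "1":
--                 currentIndex += 1
--             elif currentIndex > 0 and inputLadder[j][currentIndex - 1] == "1":
--                 currentIndex -= 1
--             j += 1
--         endList[currentIndex] = i
--         i += 1
--     return endList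
--
-- def createInitialList(tableWidth):
--     numberList = []
--     i = 0
--     while i <= len(tableWidth):
--         numberList.append(i)
--         i += 1
--     return numberList
-- ===== SOURCE B (Python) =====
-- def amidakuji(inputLadder):
--     W = len(inputLadder[0]) + 1
--     # advance a full vector of token positions row by row (rows outermost)
--     pos = list(range(W))
--     for row in inputLadder:
--         pos = [p + 1 if p < W - 1 and row[p] == "1"
--                else p - 1 if p > 0 and row[p - 1] == "1"
--                else p
--                for p in pos]
--     result = list(range(W))
--     for i, p in enumerate(pos):
--         result[p] = i
--     return result
-- ===== Notes on version B (the rewrite author's own statement) =====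
-- stated objective: simpler
-- what changed: B swaps the loop nesting: instead of tracing each token one at a time through all rows with in-place overwrites of the start list, it advances a full vector of token positions row by row (rows outermost) and then scatters indices into a fresh result list.
import Mathlib
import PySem

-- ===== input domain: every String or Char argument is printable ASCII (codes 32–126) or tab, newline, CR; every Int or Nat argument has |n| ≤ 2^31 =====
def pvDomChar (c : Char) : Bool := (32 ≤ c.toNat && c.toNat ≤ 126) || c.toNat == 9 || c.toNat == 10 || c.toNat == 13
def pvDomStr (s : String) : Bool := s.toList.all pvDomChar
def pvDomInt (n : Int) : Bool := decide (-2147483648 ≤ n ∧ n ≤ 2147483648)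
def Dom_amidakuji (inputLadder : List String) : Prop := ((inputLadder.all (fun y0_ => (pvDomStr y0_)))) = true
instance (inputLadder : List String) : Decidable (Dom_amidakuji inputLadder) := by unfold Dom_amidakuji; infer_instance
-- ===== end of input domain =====

-- B replaces A's per-token row walks (tokens outermost, in-place overwrites) by a row-outermost
-- sweep of a simultaneous position vector plus a final scatter into a fresh result list: simpler.

-- ===== PORT A =====
-- createInitialList: while i <= len(tableWidth): numberList.append(i)
def createLoop (stop : Nat) (i : Nat) (acc : List Int) : List Int :=
  if i ≤ stop then createLoop stop (i + 1) (acc ++ [(i : Int)]) else acc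
termination_by stop + 1 - i

def createInitialList (tableWidth : String) : List Int :=
  createLoop tableWidth.toList.length 0 []

-- one inner-while step: the two guarded '1' tests of A (pyGet? = none where Python raises IndexError)
def stepA (W : Int) (row : String) (c : Int) : Int :=
  if c < W - 1 ∧ PySem.Str.pyGet? row c = some '1' then c + 1
  else if 0 < c ∧ PySem.Str.pyGet? row (c - 1) = some '1' then c - 1
  else c

def amidakuji (inputLadder : List String) : List Int :=
  let startList := createInitialList (inputLadder.headD "")  -- inputLadder[0]; Pre_ gives nonemptiness
  let W : Int := (startList.length : Int)
  (PySem.List.pyRange 0 W 1).foldl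
    (fun endList i =>
      let c := inputLadder.foldl (fun c row => stepA W row c) i  -- the inner while over j
      PySem.List.pySetD endList c i)                             -- endList[currentIndex] = i
    startList

-- ===== PORT B =====
-- the identical per-position rule from B's comprehension
def stepB (W : Int) (row : String) (p : Int) : Int :=
  if p < W - 1 ∧ PySem.Str.pyGet? row p = some '1' then p + 1
  else if 0 < p ∧ PySem.Str.pyGet? row (p - 1) = some '1' then p - 1
  else p

def amidakuji_alt (inputLadder : List String) : List Int :=
  let W : Int := ((inputLadder.headD "").toList.length : Int) + 1
  let pos0 := PySem.List.pyRange 0 W 1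
  let pos := inputLadder.foldl (fun ps row => ps.map (fun p => stepB W row p)) pos0
  let result := PySem.List.pyRange 0 W 1
  (PySem.List.enumerate pos 0).foldl (fun res ip => PySem.List.pySetD res ip.2 ip.1) result

-- ===== PRECONDITION & SPEC =====
-- Pre_ excludes exactly the inputs where Python A raises: the empty list (IndexError on
-- inputLadder[0]) and ladders with a row shorter than the first row (IndexError on a row access).
def Pre_amidakuji (inputLadder : List String) : Prop :=
  inputLadder ≠ [] ∧
  ∀ row ∈ inputLadder, (inputLadder.headD "").toList.length ≤ row.toList.length

instance (inputLadder : List String) : Decidable (Pre_amidakuji inputLadder) := by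
  unfold Pre_amidakuji; infer_instance

def pvWitness_amidakuji : List String := ["10", "01"]

def Spec_amidakuji (inputLadder : List String) (out : List Int) : Prop := out = amidakuji_alt inputLadder
instance (inputLadder : List String) (out : List Int) : Decidable (Spec_amidakuji inputLadder out) := by unfold Spec_amidakuji; infer_instance

-- ===== CLAIM (what is proved, stated in full; the proofs are below) =====
def Claim_equal_amidakuji : Prop := ∀ (inputLadder : List String), Dom_amidakuji inputLadder → Pre_amidakuji inputLadder → Spec_amidakuji inputLadder (amidakuji inputLadder)

-- ===== LEMMAS AND PROOFS =====

theorem createLoop_eq : ∀ (n stop i : Nat), stop + 1 - i = n → ∀ (acc : List Int),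
    createLoop stop i acc = acc ++ (List.range' i n).map (fun (k : Nat) => (k : Int)) := by
  intro n
  induction n with
  | zero =>
    intro stop i h acc
    rw [createLoop]
    have hi : ¬ i ≤ stop := by omega
    simp [hi]
  | succ n ih =>
    intro stop i h acc
    rw [createLoop]
    have hi : i ≤ stop := by omega
    rw [if_pos hi, ih stop (i + 1) (by omega), List.range'_succ]
    simp

theorem createInitialList_eq (s : String) :
    createInitialList s = (List.range' 0 (s.toList.length + 1)).map (fun (k : Nat) => (k : Int)) := by
  rw [createInitialList, createLoop_eq (s.toList.length + 1) _ _ (by omega)]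
  rfl

theorem pyRange_zero_nat_eq (m : Nat) :
    PySem.List.pyRange 0 (m : Int) 1 = (List.range' 0 m).map (fun (k : Nat) => (k : Int)) := by
  rw [PySem.List.pyRange_one, List.range_eq_range']
  simp

theorem fold_map_comm (g : String → Int → Int) :
    ∀ (rows : List String) (l : List Int),
      rows.foldl (fun ps row => ps.map (fun p => g row p)) l
        = l.map (fun x => rows.foldl (fun c row => g row c) x) := by
  intro rows
  induction rows with
  | nil => intro l; simp
  | cons r rows ih =>
    intro l
    simp only [List.foldl_cons, ih, List.map_map]
    rfl

theorem enumerate_range' : ∀ (m s : Nat),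
    PySem.List.enumerate ((List.range' s m).map (fun (k : Nat) => (k : Int))) (s : Int)
      = (List.range' s m).map (fun (k : Nat) => ((k : Int), (k : Int))) := by
  intro m
  induction m with
  | zero =>
    intro s
    rw [List.range'_zero]
    rfl
  | succ m ih =>
    intro s
    rw [List.range'_succ]
    simp only [List.map_cons, PySem.List.enumerate_cons]
    have h : ((s : Int) + 1) = ((s + 1 : Nat) : Int) := by push_cast; ring
    rw [h, ih (s + 1)]

theorem enumerate_map (f : Int → Int) :
    ∀ (l : List Int) (s : Int),
      PySem.List.enumerate (l.map f) s
        = (PySem.List.enumerate l s).map (fun p => (p.1, f p.2)) := by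
  intro l
  induction l with
  | nil => intro s; rfl
  | cons x l ih => intro s; simp only [List.map_cons, PySem.List.enumerate_cons, ih]

-- ===== VERDICT (by name: the statement is the Claim_ definition above) =====
theorem amidakuji_spec : Claim_equal_amidakuji := by
  intro inputLadder _ _
  unfold Spec_amidakuji
  simp only [amidakuji, amidakuji_alt]
  rw [createInitialList_eq]
  set n := (inputLadder.headD "").toList.length with hn
  have hlen : (((List.range' 0 (n + 1)).map (fun (k : Nat) => (k : Int))).length : Int) = ((n + 1 : Nat) : Int) := by
    simp
  rw [hlen]
  have hW : ((n : Int) + 1) = ((n + 1 : Nat) : Int) := by push_cast; ring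
  rw [hW, pyRange_zero_nat_eq (n + 1)]
  rw [fold_map_comm (fun row c => stepB ((n + 1 : Nat) : Int) row c) inputLadder]
  have h0 := enumerate_range' (n + 1) 0
  simp only [Nat.cast_zero] at h0
  rw [enumerate_map, h0]
  simp only [List.foldl_map]
  rfl
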